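-- pv_equiv track=rewrite | github.com/joaovicmendes/mdisc-trabalho | ex50.py | maior_soma_primos
-- ===== SOURCE A (Python) =====
-- from math import ceil
--
-- def sieve_eratosthenes(x):
--     arredonda = lambda x, primo: int(ceil(float(x) / primo))
--
--     primos = [True] * x
--     primos[0] = False
--     primos[1] = False
--     lista_primo = []
--
--     for primo_atual in range(2, x):
--         if not primos[primo_atual]:
--             continue
--         lista_primo.append(primo_atual)
--         for m in range(2, arredonda(x, primo_atual)):
--             primos[m * primo_atual] = False
--     return lista_primo, primos
--
-- def maior_soma_primos(x):
--     maior = 0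
--     lista_primo, é_primo = sieve_eratosthenes(x)
--     consecutivo = 0
--     for i in range(len(lista_primo)):
--         soma = lista_primo[i]
--         consec = 1
--         for j in range(i + 1, len(lista_primo)):
--             soma += lista_primo[j]
--             consec += 1
--             if soma >= len(é_primo):
--                 break
--             if é_primo[soma] and consec > consecutivo:
--                 maior = soma
--                 consecutivo = consec
--     return maior
-- ===== SOURCE B (Python) =====
-- from math import ceil
--
-- def sieve_eratosthenes(x):
--     arredonda = lambda x, primo: int(ceil(float(x) / primo))
--
--     primos = [True] * x
--     primos[0] = False
--     primos[1] = False
--     lista_primo = []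
--
--     for primo_atual in range(2, x):
--         if not primos[primo_atual]:
--             continue
--         lista_primo.append(primo_atual)
--         for m in range(2, arredonda(x, primo_atual)):
--             primos[m * primo_atual] = False
--     return lista_primo, primos
--
-- def maior_soma_primos(x):
--     lista_primo, eh_primo = sieve_eratosthenes(x)
--     n = len(lista_primo)
--     prefixo = [0]
--     total = 0
--     for p in lista_primo:
--         total += p
--         prefixo.append(total)
--     limite = len(eh_primo)
--     # longest window first; within a length, earliest start first
--     for tam in range(n, 1, -1):
--         for i in range(0, n - tam + 1):
--             soma = prefixo[i + tam] - prefixo[i]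
--             if soma >= limite:
--                 break  # sums grow with i: no later start fits either
--             if eh_primo[soma]:
--                 return soma
--     return 0
-- ===== Notes on version B (the rewrite author's own statement) =====
-- stated objective: alternative
-- what changed: B keeps the sieve but replaces A's exhaustive best-so-far scan over all window starts with a prefix-sum array and a search over window lengths from the longest down, returning the first window whose sum is a prime below x.
import Mathlib
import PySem

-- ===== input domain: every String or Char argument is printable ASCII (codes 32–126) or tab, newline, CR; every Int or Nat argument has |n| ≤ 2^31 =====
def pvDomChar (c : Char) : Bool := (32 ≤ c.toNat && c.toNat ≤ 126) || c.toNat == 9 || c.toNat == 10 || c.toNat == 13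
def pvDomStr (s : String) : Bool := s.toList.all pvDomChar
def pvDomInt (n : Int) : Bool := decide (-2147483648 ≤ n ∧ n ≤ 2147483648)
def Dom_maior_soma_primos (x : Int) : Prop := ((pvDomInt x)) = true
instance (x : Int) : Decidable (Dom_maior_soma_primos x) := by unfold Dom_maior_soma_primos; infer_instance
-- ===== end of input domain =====

-- B keeps the sieve but searches window lengths from the longest down over a prefix-sum
-- array, returning the first prime window sum (alternative decomposition, same values).

-- ===== PORT A =====
-- int(ceil(float(x)/primo)) ported as exact integer ceiling division: exact on the stated
-- domain |x| ≤ 2^31 < 2^53, where the float rounding error is below the distance of x/primo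
-- to the nearest integer it is not equal to.
def pvArredonda (x primo : Int) : Int := -(PySem.Int.floordiv (-x) primo)

def sieve_eratosthenes (x : Int) : Array Int × Array Bool :=
  let primos := ((Array.replicate x.toNat true).setIfInBounds 0 false).setIfInBounds 1 false
  (PySem.List.pyRange 2 x 1).foldl
    (fun st primo_atual =>
      if !(st.2.getD primo_atual.toNat false) then st   -- primos[primo_atual]: index in range for 2 ≤ x
      else
        (st.1.push primo_atual,
          (PySem.List.pyRange 2 (pvArredonda x primo_atual) 1).foldl
            (fun pr m => pr.setIfInBounds (m * primo_atual).toNat false) st.2))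
    ((#[] : Array Int), primos)

-- the inner 'for j in range(i+1, len(lista_primo))' loop with its break (indices are in range)
def pvInnerA (lista : Array Int) (eh : Array Bool) : List Int → Int → Int → Int × Int → Int × Int
  | [], _, _, st => st
  | j :: js, soma, consec, st =>
      let soma := soma + lista.getD j.toNat 0
      let consec := consec + 1
      if soma ≥ (eh.size : Int) then st
      else
        let st := if eh.getD soma.toNat false && decide (consec > st.2) then (soma, consec) else st
        pvInnerA lista eh js soma consec st

-- the outer 'for i in range(len(lista_primo))' loop; st = (maior, consecutivo)
def pvOuterA (lista : Array Int) (eh : Array Bool) : List Int → Int × Int → Int × Int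
  | [], st => st
  | i :: is, st =>
      let soma := lista.getD i.toNat 0
      let st' := pvInnerA lista eh (PySem.List.pyRange (i + 1) (lista.size : Int) 1) soma 1 st
      pvOuterA lista eh is st'

def maior_soma_primos (x : Int) : Int :=
  let r := sieve_eratosthenes x
  (pvOuterA r.1 r.2 (PySem.List.pyRange 0 (r.1.size : Int) 1) (0, 0)).1

-- ===== PORT B =====
-- the inner 'for i in range(0, n - tam + 1)' scan with its break (indices are in range)
def pvScanI (P : Array Int) (eh : Array Bool) : Int → List Int → Option Int
  | _, [] => none
  | L, i :: is =>
      let soma := P.getD (i + L).toNat 0 - P.getD i.toNat 0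
      if soma ≥ (eh.size : Int) then none
      else if eh.getD soma.toNat false then some soma
      else pvScanI P eh L is

-- the outer 'for tam in range(n, 1, -1)' loop with its early return
def pvScanL (P : Array Int) (eh : Array Bool) (n : Int) : List Int → Int
  | [] => 0
  | L :: Ls =>
      match pvScanI P eh L (PySem.List.pyRange 0 (n - L + 1) 1) with
      | some s => s
      | none => pvScanL P eh n Ls

def maior_soma_primos_alt (x : Int) : Int :=
  let r := sieve_eratosthenes x
  let pref := r.1.foldl (fun (st : Array Int × Int) p => (st.1.push (st.2 + p), st.2 + p)) (#[0], 0)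
  pvScanL pref.1 r.2 (r.1.size : Int) (PySem.List.pyRange (r.1.size : Int) 1 (-1))

-- ===== PRECONDITION & SPEC =====
-- Python A raises IndexError for x < 2 (primos[0] / primos[1] on a too-short list); excluded.
def Pre_maior_soma_primos (x : Int) : Prop := 2 ≤ x
instance (x : Int) : Decidable (Pre_maior_soma_primos x) := by unfold Pre_maior_soma_primos; infer_instance
def pvWitness_maior_soma_primos : Int := 10

def Spec_maior_soma_primos (x : Int) (out : Int) : Prop := out = maior_soma_primos_alt x
instance (x : Int) (out : Int) : Decidable (Spec_maior_soma_primos x out) := by unfold Spec_maior_soma_primos; infer_instance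

-- ===== CLAIM (what is proved, stated in full; the proofs are below) =====
def Claim_equal_maior_soma_primos : Prop := ∀ (x : Int), Dom_maior_soma_primos x → Pre_maior_soma_primos x → Spec_maior_soma_primos x (maior_soma_primos x)

-- ===== LEMMAS AND PROOFS =====

-- List-level models of the array-based loops; the bridge lemmas tie them to the ports
def pvInnerAL (lista : List Int) (eh : List Bool) : List Int → Int → Int → Int × Int → Int × Int
  | [], _, _, st => st
  | j :: js, soma, consec, st =>
      let soma := soma + lista.getD j.toNat 0
      let consec := consec + 1
      if soma ≥ (eh.length : Int) then st
      else
        let st := if eh.getD soma.toNat false && decide (consec > st.2) then (soma, consec) else st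
        pvInnerAL lista eh js soma consec st

def pvOuterAL (lista : List Int) (eh : List Bool) : List Int → Int × Int → Int × Int
  | [], st => st
  | i :: is, st =>
      let soma := lista.getD i.toNat 0
      let st' := pvInnerAL lista eh (PySem.List.pyRange (i + 1) (lista.length : Int) 1) soma 1 st
      pvOuterAL lista eh is st'

def pvScanIL (P : List Int) (eh : List Bool) : Int → List Int → Option Int
  | _, [] => none
  | L, i :: is =>
      let soma := P.getD (i + L).toNat 0 - P.getD i.toNat 0
      if soma ≥ (eh.length : Int) then none
      else if eh.getD soma.toNat false then some soma
      else pvScanIL P eh L is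

def pvScanLL (P : List Int) (eh : List Bool) (n : Int) : List Int → Int
  | [] => 0
  | L :: Ls =>
      match pvScanIL P eh L (PySem.List.pyRange 0 (n - L + 1) 1) with
      | some s => s
      | none => pvScanLL P eh n Ls

theorem arr_getD {α : Type} (a : Array α) (k : Nat) (d : α) : a.getD k d = a.toList.getD k d := by
  rw [Array.getD_eq_getD_getElem?, List.getD_eq_getElem?_getD, Array.getElem?_toList]

theorem innerA_bridge (lista : Array Int) (eh : Array Bool) :
    ∀ (js : List Int) (soma consec : Int) (st : Int × Int),
    pvInnerA lista eh js soma consec st = pvInnerAL lista.toList eh.toList js soma consec st := by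
  intro js
  induction js with
  | nil => intro soma consec st; rfl
  | cons j js ih =>
      intro soma consec st
      simp only [pvInnerA, pvInnerAL, arr_getD, Array.length_toList]
      split
      · rfl
      · rw [ih]

theorem outerA_bridge (lista : Array Int) (eh : Array Bool) :
    ∀ (is : List Int) (st : Int × Int),
    pvOuterA lista eh is st = pvOuterAL lista.toList eh.toList is st := by
  intro is
  induction is with
  | nil => intro st; rfl
  | cons i is ih =>
      intro st
      simp only [pvOuterA, pvOuterAL, arr_getD, Array.length_toList, innerA_bridge]
      rw [ih]

theorem scanI_bridge (P : Array Int) (eh : Array Bool) (L : Int) :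
    ∀ (is : List Int), pvScanI P eh L is = pvScanIL P.toList eh.toList L is := by
  intro is
  induction is with
  | nil => rfl
  | cons i is ih =>
      simp only [pvScanI, pvScanIL, arr_getD, Array.length_toList]
      split
      · rfl
      · split
        · rfl
        · exact ih

theorem scanL_bridge (P : Array Int) (eh : Array Bool) (n : Int) :
    ∀ (Ls : List Int), pvScanL P eh n Ls = pvScanLL P.toList eh.toList n Ls := by
  intro Ls
  induction Ls with
  | nil => rfl
  | cons L Ls ih =>
      simp only [pvScanL, pvScanLL, scanI_bridge]
      rcases pvScanIL P.toList eh.toList L (PySem.List.pyRange 0 (n - L + 1) 1) with _ | s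
      · exact ih
      · rfl

theorem prefix_bridge : ∀ (l : List Int) (A0 : Array Int) (t0 : Int),
    (l.foldl (fun (st : Array Int × Int) q => (st.1.push (st.2 + q), st.2 + q)) (A0, t0)).1.toList
      = (l.foldl (fun (st : List Int × Int) q => (st.1 ++ [st.2 + q], st.2 + q)) (A0.toList, t0)).1 := by
  intro l
  induction l with
  | nil => intro A0 t0; rfl
  | cons a l ih =>
      intro A0 t0
      simp only [List.foldl_cons]
      rw [ih (A0.push (t0 + a)) (t0 + a), Array.toList_push]

-- window sum: sum of L consecutive primes starting at index i
def wsum (p : List Int) (i L : Nat) : Int := ((p.drop i).take L).sum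

-- the window (i, L) is one both programs would record: length ≥ 2, in range, sum < len(eh), prime
def isGood (p : List Int) (eh : List Bool) (i L : Nat) : Bool :=
  decide (2 ≤ L) && decide (i + L ≤ p.length) && decide (wsum p i L < (eh.length : Int)) && eh.getD (wsum p i L).toNat false

-- A's update step, on (i, L) windows
def updA (p : List Int) (eh : List Bool) (st : Int × Int) (pr : Nat × Nat) : Int × Int :=
  if isGood p eh pr.1 pr.2 && decide ((pr.2 : Int) > st.2) then (wsum p pr.1 pr.2, (pr.2 : Int)) else st

def rowA (p : List Int) (i : Nat) : List (Nat × Nat) :=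
  (List.range' 2 (p.length - i - 1)).map (Prod.mk i)

def pairsA (p : List Int) : List (Nat × Nat) := (List.range p.length).flatMap (rowA p)

-- B's search, window lengths descending, abstracted from the prefix-sum port
def bsearch (p : List Int) (eh : List Bool) : Nat → Int
  | 0 => 0
  | 1 => 0
  | (L+2) =>
      match (List.range (p.length - (L+2) + 1)).find? (fun i => isGood p eh i (L+2)) with
      | some i => wsum p i (L+2)
      | none => bsearch p eh (L+1)

theorem wsum_zero (p : List Int) (i : Nat) : wsum p i 0 = 0 := by simp [wsum]

theorem wsum_succ (p : List Int) (i L : Nat) (h : i + L < p.length) :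
    wsum p i (L+1) = wsum p i L + p.getD (i+L) 0 := by
  have hL : L < (p.drop i).length := by simp; omega
  simp [wsum, List.take_add_one, List.getElem?_drop, List.getElem?_eq_getElem (by omega : i + L < p.length),
    List.getD_eq_getElem?_getD]

theorem wsum_one (p : List Int) (i : Nat) (h : i < p.length) : wsum p i 1 = p.getD i 0 := by
  have := wsum_succ p i 0 (by omega)
  simpa [wsum_zero] using this

theorem wsum_mono_right (p : List Int) (hpos : ∀ q ∈ p, (1:Int) ≤ q) (i L0 L : Nat)
    (hL : L0 ≤ L) (h : i + L ≤ p.length) : wsum p i L0 ≤ wsum p i L := by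
  induction L with
  | zero => have : L0 = 0 := by omega
            simp [this]
  | succ L ih =>
      rcases Nat.lt_or_ge L0 (L+1) with hlt | hge
      · have h1 : wsum p i L0 ≤ wsum p i L := by
          rcases Nat.lt_or_ge i (p.length) with _ | _ <;> exact ih (by omega) (by omega)
        have h2 : wsum p i L ≤ wsum p i (L+1) := by
          rw [wsum_succ p i L (by omega)]
          have : (1:Int) ≤ p.getD (i+L) 0 := by
            have hm : p.getD (i+L) 0 ∈ p := by
              rw [List.getD_eq_getElem?_getD, List.getElem?_eq_getElem (by omega : i + L < p.length)]
              exact List.getElem_mem _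
            exact hpos _ hm
          omega
        omega
      · have : L0 = L + 1 := by omega
        simp [this]

theorem wsum_step_left (p : List Int) (hs : p.Pairwise (· < ·)) (i L : Nat)
    (h1 : 1 ≤ L) (h : i + 1 + L ≤ p.length) : wsum p i L ≤ wsum p (i+1) L := by
  -- wsum i (L+1) two ways
  have e1 : wsum p i (L+1) = wsum p i L + p.getD (i+L) 0 := wsum_succ p i L (by omega)
  have e2 : wsum p i (L+1) = p.getD i 0 + wsum p (i+1) L := by
    rw [wsum, List.drop_eq_getElem_cons (show i < p.length by omega), List.take_succ_cons,
        List.sum_cons, List.getD_eq_getElem?_getD, List.getElem?_eq_getElem (show i < p.length by omega)]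
    rfl
  have hgl : p.getD i 0 < p.getD (i+L) 0 := by
    rw [List.getD_eq_getElem?_getD, List.getElem?_eq_getElem (show i < p.length by omega),
        List.getD_eq_getElem?_getD, List.getElem?_eq_getElem (show i + L < p.length by omega)]
    exact List.pairwise_iff_getElem.1 hs i (i+L) (by omega) (by omega) (by omega)
  omega

theorem wsum_mono_left (p : List Int) (hs : p.Pairwise (· < ·)) (i i' L : Nat)
    (h1 : 1 ≤ L) (hii : i ≤ i') (h : i' + L ≤ p.length) : wsum p i L ≤ wsum p i' L := by
  induction i' with
  | zero => have : i = 0 := by omega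
            simp [this]
  | succ j ih =>
      rcases Nat.lt_or_ge i (j+1) with hlt | hge
      · have := ih (by omega) (by omega)
        have := wsum_step_left p hs j L h1 (by omega)
        omega
      · have : i = j + 1 := by omega
        simp [this]

theorem isGood_elim (p : List Int) (eh : List Bool) (i L : Nat) (h : isGood p eh i L = true) :
    2 ≤ L ∧ i + L ≤ p.length ∧ wsum p i L < (eh.length : Int) ∧ eh.getD (wsum p i L).toNat false = true := by
  simp [isGood] at h
  tauto

theorem foldl_updA_bound (p : List Int) (eh : List Bool) (l : List (Nat × Nat)) (st : Int × Int) (m : Int)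
    (h0 : st.2 ≤ m) (h : ∀ pr ∈ l, isGood p eh pr.1 pr.2 = true → (pr.2 : Int) ≤ m) :
    (l.foldl (updA p eh) st).2 ≤ m := by
  induction l generalizing st with
  | nil => simpa using h0
  | cons a l ih =>
      simp only [List.foldl_cons]
      apply ih
      · by_cases hg : isGood p eh a.1 a.2 = true
        · simp only [updA, hg]
          split
          · exact h a (by simp) hg
          · exact h0
        · simp [updA, hg, h0]
      · intro pr hpr hg
        exact h pr (by simp [hpr]) hg

theorem foldl_updA_id (p : List Int) (eh : List Bool) (l : List (Nat × Nat)) (st : Int × Int)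
    (h : ∀ pr ∈ l, isGood p eh pr.1 pr.2 = true → (pr.2 : Int) ≤ st.2) :
    l.foldl (updA p eh) st = st := by
  induction l with
  | nil => simp
  | cons a l ih =>
      have ha : updA p eh st a = st := by
        by_cases hg : isGood p eh a.1 a.2 = true
        · have := h a (by simp) hg
          simp [updA, hg]
          omega
        · simp [updA, hg]
      simp only [List.foldl_cons, ha]
      exact ih (fun pr hpr hg => h pr (by simp [hpr]) hg)

theorem foldl_updA_split (p : List Int) (eh : List Bool) (l1 l2 : List (Nat × Nat))
    (i0 L0 : Nat) (st : Int × Int)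
    (hg : isGood p eh i0 L0 = true) (hst : st.2 < (L0 : Int))
    (h1 : ∀ pr ∈ l1, isGood p eh pr.1 pr.2 = true → (pr.2 : Int) < (L0 : Int))
    (h2 : ∀ pr ∈ l2, isGood p eh pr.1 pr.2 = true → (pr.2 : Int) ≤ (L0 : Int)) :
    (l1 ++ (i0, L0) :: l2).foldl (updA p eh) st = (wsum p i0 L0, (L0 : Int)) := by
  rw [List.foldl_append]
  have hb : (l1.foldl (updA p eh) st).2 ≤ (L0 : Int) - 1 := by
    apply foldl_updA_bound p eh l1 st _ (by omega)
    intro pr hpr hgg; have := h1 pr hpr hgg; omega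
  simp only [List.foldl_cons]
  have hu : updA p eh (l1.foldl (updA p eh) st) (i0, L0) = (wsum p i0 L0, (L0 : Int)) := by
    simp only [updA, hg]
    have : ((L0:Int) > (l1.foldl (updA p eh) st).2) := by omega
    simp [this]
  rw [hu]
  exact foldl_updA_id p eh l2 _ (by intro pr hpr hgg; exact h2 pr hpr hgg)


theorem foldl_row (p : List Int) (eh : List Bool) (a b i : Nat) (st : Int × Int) :
    (List.range' a b).foldl (fun st L => updA p eh st (i, L)) st
      = ((List.range' a b).map (Prod.mk i)).foldl (updA p eh) st :=
  (List.foldl_map).symm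

theorem updA_step (p : List Int) (eh : List Bool) (i c : Nat) (st : Int × Int)
    (hc : 1 ≤ c) (hle : i + (c+1) ≤ p.length) (hlim : wsum p i (c+1) < (eh.length : Int)) :
    updA p eh st (i, c+1)
      = if eh.getD (wsum p i (c+1)).toNat false && decide ((c:Int) + 1 > st.2)
        then (wsum p i (c+1), (c:Int)+1) else st := by
  have h1 : isGood p eh i (c+1) = eh.getD (wsum p i (c+1)).toNat false := by
    simp [isGood, show 2 ≤ c + 1 by omega, hle, hlim]
  have h2 : ((c+1:Nat):Int) = (c:Int) + 1 := by push_cast; ring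
  simp only [updA, h1, h2]

theorem sieve_fst_inv (step : Array Int × Array Bool → Int → Array Int × Array Bool)
    (hstep : ∀ st b, (step st b).1.toList = st.1.toList ∨ (step st b).1.toList = st.1.toList ++ [b]) :
    ∀ (l : List Int) (st : Array Int × Array Bool),
      st.1.toList.Pairwise (· < ·) → (∀ a ∈ st.1.toList, ∀ b ∈ l, a < b) → (∀ a ∈ st.1.toList, (2:Int) ≤ a) →
      (∀ b ∈ l, (2:Int) ≤ b) → l.Pairwise (· < ·) →
      (l.foldl step st).1.toList.Pairwise (· < ·) ∧ ∀ a ∈ (l.foldl step st).1.toList, (2:Int) ≤ a := by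
  intro l
  induction l with
  | nil => intro st h1 _ h3 _ _; exact ⟨h1, h3⟩
  | cons q l ih =>
      intro st h1 h2 h3 h4 h5
      simp only [List.foldl_cons]
      have hlt_tail : ∀ c ∈ l, q < c := (List.pairwise_cons.1 h5).1
      rcases hstep st q with he | he
      · refine ih (step st q) (he ▸ h1) ?_ (he ▸ h3) (fun c hc => h4 c (by simp [hc]))
          (List.pairwise_cons.1 h5).2
        rw [he]; intro a ha c hc; exact h2 a ha c (by simp [hc])
      · apply ih (step st q)
        · rw [he]
          refine List.pairwise_append.2 ⟨h1, by simp, ?_⟩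
          intro a ha c hc
          simp at hc
          rw [hc]
          exact h2 a ha q (by simp)
        · rw [he]; intro a ha c hc
          rcases List.mem_append.1 ha with ha | ha
          · exact h2 a ha c (by simp [hc])
          · simp at ha; rw [ha]; exact hlt_tail c hc
        · rw [he]; intro a ha
          rcases List.mem_append.1 ha with ha | ha
          · exact h3 a ha
          · simp at ha; rw [ha]; exact h4 q (by simp)
        · intro c hc; exact h4 c (by simp [hc])
        · exact (List.pairwise_cons.1 h5).2

theorem sieve_sorted_ge2 (x : Int) :
    (sieve_eratosthenes x).1.toList.Pairwise (· < ·) ∧ ∀ a ∈ (sieve_eratosthenes x).1.toList, (2:Int) ≤ a := by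
  unfold sieve_eratosthenes
  apply sieve_fst_inv
  · intro st b
    by_cases hb : st.2.getD b.toNat false = false
    · left; simp [hb]
    · right; simp [hb, Array.toList_push]
  · simp
  · simp
  · simp
  · intro b hb; exact (PySem.List.mem_pyRange_one.1 hb).1
  · exact PySem.List.pairwise_lt_pyRange_one 2 x

theorem innerA_eq (p : List Int) (eh : List Bool) (hpos : ∀ q ∈ p, (1:Int) ≤ q) :
    ∀ (k c i : Nat) (st : Int × Int), 1 ≤ c → i + c ≤ p.length → p.length - (i + c) = k →
    pvInnerAL p eh (PySem.List.pyRange ((i:Int) + (c:Int)) (p.length : Int) 1) (wsum p i c) (c:Int) st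
      = (List.range' (c+1) (p.length - i - c)).foldl (fun st L => updA p eh st (i, L)) st := by
  intro k
  induction k with
  | zero =>
      intro c i st hc hle hk
      have h1 : ((i:Int) + (c:Int)) = (p.length : Int) := by omega
      have h2 : p.length - i - c = 0 := by omega
      rw [h1, PySem.List.pyRange_one_eq_nil (le_refl _), h2]
      simp [pvInnerAL]
  | succ k ih =>
      intro c i st hc hle hk
      have hlt : i + c < p.length := by omega
      have hcast : ((i:Int) + (c:Int)) = ((i + c : Nat) : Int) := by omega
      rw [hcast, PySem.List.pyRange_one_cons (by exact_mod_cast hlt)]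
      simp only [pvInnerAL, Int.toNat_natCast]
      rw [show wsum p i c + p.getD (i + c) 0 = wsum p i (c+1) from (wsum_succ p i c hlt).symm]
      have hrange : p.length - i - c = (p.length - i - c - 1) + 1 := by omega
      by_cases hbig : wsum p i (c+1) ≥ (eh.length : Int)
      · rw [if_pos hbig]
        symm
        rw [foldl_row]
        apply foldl_updA_id
        intro pr hpr hg
        exfalso
        simp only [List.mem_map] at hpr
        obtain ⟨L, hL, rfl⟩ := hpr
        have hLb := List.mem_range'_1.1 hL
        obtain ⟨-, hiL, hlim, -⟩ := isGood_elim p eh i L hg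
        have : wsum p i (c+1) ≤ wsum p i L := wsum_mono_right p hpos i (c+1) L (by omega) hiL
        omega
      · rw [if_neg hbig]
        rw [hrange, List.range'_succ, List.foldl_cons]
        rw [← updA_step p eh i c st hc (by omega) (by omega)]
        have hc2 : ((i + c : Nat) : Int) + 1 = ((i : Int) + ((c + 1 : Nat) : Int)) := by push_cast; ring
        have hc3 : ((c : Int) + 1) = ((c + 1 : Nat) : Int) := by push_cast; ring
        rw [hc2, hc3, ih (c+1) i _ (by omega) (by omega) (by omega)]
        have h4 : p.length - i - (c+1) = p.length - i - c - 1 := by omega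
        rw [h4]

theorem outerA_eq (p : List Int) (eh : List Bool) (hpos : ∀ q ∈ p, (1:Int) ≤ q) :
    ∀ (k i : Nat) (st : Int × Int), i ≤ p.length → p.length - i = k →
    pvOuterAL p eh (PySem.List.pyRange (i : Int) (p.length : Int) 1) st
      = (List.range' i (p.length - i)).foldl
          (fun st i => (List.range' 2 (p.length - i - 1)).foldl (fun st L => updA p eh st (i, L)) st) st := by
  intro k
  induction k with
  | zero =>
      intro i st hle hk
      have h1 : ((i:Int)) = (p.length : Int) := by omega
      have h2 : p.length - i = 0 := by omega
      rw [h1, PySem.List.pyRange_one_eq_nil (le_refl _), h2]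
      simp [pvOuterAL]
  | succ k ih =>
      intro i st hle hk
      have hlt : i < p.length := by omega
      rw [PySem.List.pyRange_one_cons (by exact_mod_cast hlt)]
      simp only [pvOuterAL, Int.toNat_natCast]
      rw [show p.getD i 0 = wsum p i 1 from (wsum_one p i hlt).symm]
      have hinner := innerA_eq p eh hpos (p.length - (i+1)) 1 i st (le_refl _) (by omega) (by omega)
      norm_num at hinner
      rw [hinner]
      have h2 : p.length - i = (p.length - i - 1) + 1 := by omega
      rw [h2, List.range'_succ, List.foldl_cons]
      have h3 : ((i:Int) + 1) = (((i+1 : Nat)):Int) := by push_cast; ring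
      rw [h3, ih (i+1) _ (by omega) (by omega)]
      have h5 : p.length - i - 1 + 1 - 1 = p.length - i - 1 := by omega
      have h6 : p.length - (i + 1) = p.length - i - 1 := by omega
      rw [h5, h6]

theorem Afold_eq (p : List Int) (eh : List Bool) (hpos : ∀ q ∈ p, (1:Int) ≤ q) (st : Int × Int) :
    pvOuterAL p eh (PySem.List.pyRange 0 (p.length : Int) 1) st = (pairsA p).foldl (updA p eh) st := by
  have h0 : ((0:Int)) = ((0:Nat):Int) := rfl
  rw [h0, outerA_eq p eh hpos p.length 0 st (by omega) (by omega)]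
  rw [pairsA, List.foldl_flatMap, List.range_eq_range']
  simp only [Nat.sub_zero]
  congr 1
  funext st i
  rw [foldl_row]
  rfl

theorem prefix_fold (l : List Int) : ∀ (P0 : List Int) (t0 : Int),
    l.foldl (fun (st : List Int × Int) p => (st.1 ++ [st.2 + p], st.2 + p)) (P0, t0)
      = (P0 ++ (List.range l.length).map (fun k => t0 + (l.take (k+1)).sum), t0 + l.sum) := by
  induction l with
  | nil => intro P0 t0; simp
  | cons a l ih =>
      intro P0 t0
      simp only [List.foldl_cons, ih (P0 ++ [t0 + a]) (t0 + a)]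
      rw [List.append_assoc]
      simp only [Prod.mk.injEq]
      refine ⟨?_, by simp [List.sum_cons]; ring⟩
      congr 1
      rw [List.length_cons, List.range_succ_eq_map, List.map_cons, List.map_map]
      simp only [List.take_succ_cons, List.sum_cons, List.singleton_append]
      congr 1
      · simp
      · apply List.map_congr_left
        intro k _
        simp [Function.comp]
        ring

theorem wsum_eq_take (p : List Int) (i L : Nat) :
    wsum p i L = (p.take (i+L)).sum - (p.take i).sum := by
  rw [List.take_add, List.sum_append, wsum]
  ring

theorem prefix_getD (p : List Int) (k : Nat) (hk : k ≤ p.length) :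
    ((p.foldl (fun (st : List Int × Int) q => (st.1 ++ [st.2 + q], st.2 + q)) ([0], 0)).1).getD k 0
      = (p.take k).sum := by
  rw [prefix_fold p [0] 0]
  rcases k with _ | j
  · simp
  · have hj : j < p.length := by omega
    simp only [List.singleton_append, List.getD_cons_succ]
    rw [List.getD_eq_getElem?_getD, List.getElem?_map,
        List.getElem?_range hj]
    simp

theorem find?_range'_some (f : Nat → Bool) : ∀ (n s k : Nat), s ≤ k → k < s + n → f k = true →
    (∀ j, s ≤ j → j < k → f j = false) → (List.range' s n).find? f = some k := by
  intro n
  induction n with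
  | zero => intro s k h1 h2; omega
  | succ n ih =>
      intro s k h1 h2 hk hmin
      rw [List.range'_succ]
      rcases Nat.eq_or_lt_of_le h1 with rfl | hlt
      · rw [List.find?_cons_of_pos (p := f) hk]
      · rw [List.find?_cons_of_neg (p := f) (by simp [hmin s (le_refl s) hlt])]
        exact ih (s+1) k hlt (by omega) hk (fun j hj1 hj2 => hmin j (by omega) hj2)

theorem scanI_eq (p : List Int) (eh : List Bool) (P : List Int)
    (hP : ∀ k, k ≤ p.length → P.getD k 0 = (p.take k).sum)
    (hs : p.Pairwise (· < ·)) (L : Nat) (hL2 : 2 ≤ L) (hLn : L ≤ p.length) :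
    ∀ (k i0 : Nat), i0 ≤ p.length - L + 1 → p.length - L + 1 - i0 = k →
    pvScanIL P eh (L : Int) (PySem.List.pyRange (i0 : Int) ((p.length : Int) - (L : Int) + 1) 1)
      = ((List.range' i0 (p.length - L + 1 - i0)).find? (fun i => isGood p eh i L)).map
          (fun i => wsum p i L) := by
  intro k
  induction k with
  | zero =>
      intro i0 hi hk
      have hb : ((p.length : Int) - (L : Int) + 1) = ((i0 : Nat) : Int) := by omega
      rw [hb, PySem.List.pyRange_one_eq_nil (le_refl _), hk]
      simp [pvScanIL]
  | succ k ih =>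
      intro i0 hi hk
      have hlt : i0 < p.length - L + 1 := by omega
      have hiL : i0 + L ≤ p.length := by omega
      have hb : ((p.length : Int) - (L : Int) + 1) = (((p.length - L + 1 : Nat)) : Int) := by omega
      rw [hb, PySem.List.pyRange_one_cons (by exact_mod_cast hlt)]
      simp only [pvScanIL]
      have hsum : P.getD ((i0 : Int) + (L : Int)).toNat 0 - P.getD ((i0 : Int)).toNat 0
          = wsum p i0 L := by
        have hc : ((i0 : Int) + (L : Int)) = (((i0 + L : Nat)) : Int) := by push_cast; ring
        rw [hc, Int.toNat_natCast, Int.toNat_natCast, hP (i0 + L) hiL, hP i0 (by omega), wsum_eq_take]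
      rw [hsum]
      have hrest : p.length - L + 1 - i0 = (p.length - L + 1 - i0 - 1) + 1 := by omega
      by_cases hbig : wsum p i0 L ≥ (eh.length : Int)
      · rw [if_pos hbig]
        have hnone : (List.range' i0 (p.length - L + 1 - i0)).find? (fun i => isGood p eh i L) = none := by
          apply List.find?_eq_none.2
          intro i hi'
          have hib := List.mem_range'_1.1 hi'
          have hmono : wsum p i0 L ≤ wsum p i L :=
            wsum_mono_left p hs i0 i L (by omega) (by omega) (by omega)
          have hnl : ¬ (wsum p i L < (eh.length : Int)) := by omega
          simp [isGood, hnl]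
        rw [hnone]
        rfl
      · rw [if_neg hbig]
        rw [hrest, List.range'_succ]
        by_cases hprime : eh.getD (wsum p i0 L).toNat false = true
        · rw [if_pos hprime]
          have hgood : isGood p eh i0 L = true := by
            have h3 : wsum p i0 L < (eh.length : Int) := by omega
            unfold isGood
            rw [hprime]
            simp [hL2, hiL, h3]
          rw [List.find?_cons_of_pos (p := fun i => isGood p eh i L) (by simpa using hgood)]
          simp
        · rw [if_neg hprime]
          have hgood : isGood p eh i0 L = false := by
            unfold isGood
            rw [show eh.getD (wsum p i0 L).toNat false = false from by simpa using hprime]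
            simp
          rw [List.find?_cons_of_neg (p := fun i => isGood p eh i L) (by simp [hgood])]
          have hc1 : ((i0 : Int) + 1) = (((i0 + 1 : Nat)) : Int) := by push_cast; ring
          rw [← hb, hc1, ih (i0 + 1) (by omega) (by omega)]
          have hc2 : p.length - L + 1 - i0 - 1 = p.length - L + 1 - (i0 + 1) := by omega
          rw [hc2]

theorem scanL_eq (p : List Int) (eh : List Bool) (P : List Int)
    (hP : ∀ k, k ≤ p.length → P.getD k 0 = (p.take k).sum)
    (hs : p.Pairwise (· < ·)) :
    ∀ (L : Nat), L ≤ p.length →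
    pvScanLL P eh (p.length : Int) (PySem.List.pyRange (L : Int) 1 (-1)) = bsearch p eh L := by
  intro L
  induction L using Nat.strong_induction_on with
  | _ L ih =>
      rcases L with _ | _ | m
      · intro _
        rw [PySem.List.pyRange_neg_one_eq_nil (by norm_num)]
        rfl
      · intro _
        rw [PySem.List.pyRange_neg_one_eq_nil (by norm_num)]
        rfl
      · intro hLn
        rw [PySem.List.pyRange_neg_one_cons (by exact_mod_cast (by omega : (1:Nat) < m+2))]
        simp only [pvScanLL]
        have h0 : ((0 : Int)) = (((0:Nat)) : Int) := rfl
        rw [h0, scanI_eq p eh P hP hs (m+2) (by omega) hLn (p.length - (m+2) + 1) 0 (by omega) (by omega)]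
        rw [Nat.sub_zero, ← List.range_eq_range']
        have htail : ((m + 2 : Nat) : Int) - 1 = (((m + 1 : Nat)) : Int) := by push_cast; ring
        rw [htail, ih (m+1) (by omega) (by omega)]
        show (match ((List.range (p.length - (m+2) + 1)).find? (fun i => isGood p eh i (m+2))).map
            (fun i => wsum p i (m+2)) with
          | some s => s
          | none => bsearch p eh (m+1)) = bsearch p eh (m+2)
        rcases hf : (List.range (p.length - (m+2) + 1)).find? (fun i => isGood p eh i (m+2)) with _ | i
        · simp only [Option.map_none]
          conv_rhs => rw [bsearch]
          rw [hf]
        · simp only [Option.map_some]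
          conv_rhs => rw [bsearch]
          rw [hf]

theorem bsearch_of_none (p : List Int) (eh : List Bool)
    (hall : ∀ i L, isGood p eh i L = false) : ∀ L, bsearch p eh L = 0 := by
  intro L
  induction L using Nat.strong_induction_on with
  | _ L ih =>
      rcases L with _ | _ | m
      · rfl
      · rfl
      · have hnone : (List.range (p.length - (m+2) + 1)).find? (fun i => isGood p eh i (m+2)) = none :=
          List.find?_eq_none.2 (fun i _ => by simp [hall])
        conv_lhs => rw [bsearch]
        rw [hnone]
        exact ih (m+1) (by omega)

theorem range'_split : ∀ (k s m : Nat), k < m →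
    List.range' s m = List.range' s k ++ (s + k) :: List.range' (s + k + 1) (m - k - 1) := by
  intro k
  induction k with
  | zero =>
      intro s m h
      have hm : m = (m - 1) + 1 := by omega
      rw [hm, List.range'_succ]
      simp
  | succ k ih =>
      intro s m h
      have hm : m = (m - 1) + 1 := by omega
      rw [hm, List.range'_succ, ih (s+1) (m-1) (by omega)]
      rw [show m - 1 + 1 - (k+1) - 1 = m - 1 - k - 1 from by omega,
          show s + (k+1) + 1 = s + 1 + k + 1 from by omega,
          show s + (k+1) = s + 1 + k from by omega,
          List.range'_succ, List.cons_append]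

theorem bsearch_hit (p : List Int) (eh : List Bool) (Lmax imin : Nat)
    (hgood : isGood p eh imin Lmax = true) (h2 : 2 ≤ Lmax) (hiL : imin + Lmax ≤ p.length)
    (hminlt : ∀ j, j < imin → isGood p eh j Lmax = false)
    (hmax : ∀ i L, isGood p eh i L = true → L ≤ Lmax) :
    ∀ L, Lmax ≤ L → L ≤ p.length → bsearch p eh L = wsum p imin Lmax := by
  intro L
  induction L using Nat.strong_induction_on with
  | _ L ih =>
      intro hL1 hL2n
      rcases L with _ | _ | m
      · omega
      · omega
      · rcases Nat.eq_or_lt_of_le hL1 with heq | hlt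
        · have hf : (List.range (p.length - (m+2) + 1)).find? (fun i => isGood p eh i (m+2)) = some imin := by
            rw [List.range_eq_range']
            apply find?_range'_some
            · omega
            · omega
            · simpa [← heq] using hgood
            · intro j _ hj
              simpa [← heq] using hminlt j hj
          conv_lhs => rw [bsearch]
          rw [hf, ← heq]
        · have hf : (List.range (p.length - (m+2) + 1)).find? (fun i => isGood p eh i (m+2)) = none := by
            apply List.find?_eq_none.2
            intro i _
            simp only [Bool.not_eq_true]
            by_contra hb
            have : isGood p eh i (m+2) = true := by simpa using hb
            have := hmax i (m+2) this
            omega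
          conv_lhs => rw [bsearch]
          rw [hf]
          exact ih (m+1) (by omega) (by omega) (by omega)

theorem core (p : List Int) (eh : List Bool) :
    ((pairsA p).foldl (updA p eh) (0, 0)).1 = bsearch p eh p.length := by
  by_cases hex : ∃ i L, isGood p eh i L = true
  · obtain ⟨i0, L0, hg0⟩ := hex
    obtain ⟨hL02, hle0, -, -⟩ := isGood_elim p eh i0 L0 hg0
    haveI : DecidablePred (fun L : Nat => ∃ i, i < p.length ∧ isGood p eh i L = true) :=
      fun _ => Classical.dec _
    have hQ0 : (fun L => ∃ i, i < p.length ∧ isGood p eh i L = true) L0 := ⟨i0, by omega, hg0⟩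
    have hL0n : L0 ≤ p.length := by omega
    have hQmax := Nat.findGreatest_spec (P := fun L : Nat => ∃ i, i < p.length ∧ isGood p eh i L = true) hL0n hQ0
    have hLmax_ge := Nat.le_findGreatest (P := fun L : Nat => ∃ i, i < p.length ∧ isGood p eh i L = true) hL0n hQ0
    set Lmax := Nat.findGreatest (fun L => ∃ i, i < p.length ∧ isGood p eh i L = true) p.length with hLm
    have hmax : ∀ i L, isGood p eh i L = true → L ≤ Lmax := by
      intro i L hg
      by_contra h
      have h : Lmax < L := by omega
      obtain ⟨hg2, hgiL, -, -⟩ := isGood_elim p eh i L hg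
      exact Nat.findGreatest_is_greatest (P := fun L : Nat => ∃ i, i < p.length ∧ isGood p eh i L = true) h (by omega) ⟨i, by omega, hg⟩
    have hEx : ∃ i, i < p.length ∧ isGood p eh i Lmax = true := hQmax
    have hspec := Nat.find_spec hEx
    set imin := Nat.find hEx with him
    have hminlt : ∀ j, j < imin → isGood p eh j Lmax = false := by
      intro j hj
      have hmin := Nat.find_min hEx hj
      by_contra hb
      exact hmin ⟨by omega, by simpa using hb⟩
    obtain ⟨hL2max, hiLmax, -, -⟩ := isGood_elim p eh imin Lmax hspec.2
    have h2 : 2 ≤ Lmax := by omega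
    -- A side: split the pair list around (imin, Lmax) and fold
    have hsplitrange : List.range p.length
        = List.range imin ++ imin :: List.range' (imin + 1) (p.length - imin - 1) := by
      rw [List.range_eq_range', List.range_eq_range', range'_split imin 0 p.length (by omega)]
      simp
    have hsplitrow : List.range' 2 (p.length - imin - 1)
        = List.range' 2 (Lmax - 2) ++ Lmax :: List.range' (Lmax + 1) (p.length - imin - Lmax) := by
      rw [range'_split (Lmax - 2) 2 (p.length - imin - 1) (by omega)]
      rw [show 2 + (Lmax - 2) + 1 = Lmax + 1 from by omega,
          show 2 + (Lmax - 2) = Lmax from by omega,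
          show p.length - imin - 1 - (Lmax - 2) - 1 = p.length - imin - Lmax from by omega]
    have hsplit : pairsA p
        = ((List.range imin).flatMap (rowA p) ++ (List.range' 2 (Lmax - 2)).map (Prod.mk imin))
          ++ (imin, Lmax) :: ((List.range' (Lmax + 1) (p.length - imin - Lmax)).map (Prod.mk imin)
          ++ (List.range' (imin + 1) (p.length - imin - 1)).flatMap (rowA p)) := by
      rw [pairsA, hsplitrange, List.flatMap_append, List.flatMap_cons]
      rw [show rowA p imin = (List.range' 2 (p.length - imin - 1)).map (Prod.mk imin) from rfl]
      rw [hsplitrow, List.map_append, List.map_cons]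
      simp [List.append_assoc]
    rw [hsplit, foldl_updA_split p eh _ _ imin Lmax (0, 0) hspec.2 (by exact_mod_cast by omega)]
    · exact (bsearch_hit p eh Lmax imin hspec.2 h2 hiLmax hminlt hmax p.length (by omega) (le_refl _)).symm
    · intro pr hpr hg
      have hle : pr.2 ≤ Lmax := hmax pr.1 pr.2 hg
      have hne : ¬ (pr.1 < imin ∧ pr.2 = Lmax) := by
        rintro ⟨hi, hL⟩
        rw [hL] at hg
        rw [hminlt pr.1 hi] at hg
        cases hg
      rcases List.mem_append.1 hpr with hpr | hpr
      · simp only [List.mem_flatMap, rowA, List.mem_map] at hpr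
        obtain ⟨i, hi, L, hL, hprL⟩ := hpr
        have hi' : i < imin := List.mem_range.1 hi
        have : pr.2 < Lmax ∨ pr.2 = Lmax := by omega
        rcases this with h | h
        · exact_mod_cast h
        · exact absurd ⟨by rw [← hprL]; exact hi', h⟩ hne
      · simp only [List.mem_map] at hpr
        obtain ⟨L, hL, hprL⟩ := hpr
        have := (List.mem_range'_1.1 hL).2
        have : pr.2 < Lmax := by rw [← hprL]; omega
        exact_mod_cast this
    · intro pr hpr hg
      exact_mod_cast hmax pr.1 pr.2 hg
  · have hall : ∀ i L, isGood p eh i L = false := by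
      intro i L
      by_contra h
      exact hex ⟨i, L, by simpa using h⟩
    rw [foldl_updA_id p eh _ _ (by intro pr _ hg; rw [hall] at hg; cases hg)]
    rw [bsearch_of_none p eh hall]

-- ===== VERDICT (by name: the statement is the Claim_ definition above) =====
theorem maior_soma_primos_spec : Claim_equal_maior_soma_primos := by
  intro x hdom hpre
  unfold Spec_maior_soma_primos
  obtain ⟨hsort, hge2⟩ := sieve_sorted_ge2 x
  have hpos : ∀ q ∈ (sieve_eratosthenes x).1.toList, (1:Int) ≤ q :=
    fun q hq => le_trans (by norm_num) (hge2 q hq)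
  show maior_soma_primos x = maior_soma_primos_alt x
  simp only [maior_soma_primos, maior_soma_primos_alt]
  rw [outerA_bridge, scanL_bridge, ← Array.foldl_toList, prefix_bridge]
  rw [show ((#[0] : Array Int)).toList = [0] from rfl]
  rw [show ((sieve_eratosthenes x).1.size : Int) = ((sieve_eratosthenes x).1.toList.length : Int) from
    by rw [Array.length_toList]]
  rw [Afold_eq _ _ hpos, core]
  have hP : ∀ k, k ≤ (sieve_eratosthenes x).1.toList.length →
      (((sieve_eratosthenes x).1.toList.foldl
        (fun (st : List Int × Int) q => (st.1 ++ [st.2 + q], st.2 + q)) ([0], 0)).1).getD k 0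
        = ((sieve_eratosthenes x).1.toList.take k).sum :=
    fun k hk => prefix_getD _ k hk
  rw [scanL_eq _ _ _ hP hsort _ (le_refl _)]
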